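-- pv_equiv track=rewrite | github.com/RagePly/aoc25 | day6.py | part1
-- ===== SOURCE A (Python) =====
-- from typing import Any
--
-- def part1(src: str) -> Any:
--     s = 0
--     cols = []
--     for line in src.splitlines():
--         for i, c in enumerate(line.split()):
--             if c == "+":
--                 s += sum(cols[i])
--             elif c == "*":
--                 p = 1
--                 for n in cols[i]:
--                     p *= n
--                 s += p
--             else:
--                 if i >= len(cols):
--                     cols.append([int(c)])
--                 else:
--                     cols[i].append(int(c))
--     return s
-- ===== SOURCE B (Python) =====
-- from typing import Any
--
-- def part1(src: str) -> Any:
--     # One flattened token stream and one immutable list of (sum, product) pairs per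
--     # column, rebuilt by slicing; no per-column number lists rescanned per operator.
--     toks = [t for line in src.splitlines() for t in enumerate(line.split())]
--     total = 0
--     cols = []
--     for i, c in toks:
--         if c == "+":
--             total += cols[i][0]
--         elif c == "*":
--             total += cols[i][1]
--         else:
--             n = int(c)
--             if i >= len(cols):
--                 cols = cols + [(n, n)]
--             else:
--                 cols = cols[:i] + [(cols[i][0] + n, cols[i][1] * n)] + cols[i + 1:]
--     return total
-- ===== Notes on version B (the rewrite author's own statement) =====
-- stated objective: alternative
-- what changed: B flattens the per-line tokens into one stream and keeps a single immutable list of (sum, product) pairs, rebuilt by slicing on each number, instead of A's nested loops over per-column number lists rescanned on every '+'/'*' operator.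
import Mathlib
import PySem

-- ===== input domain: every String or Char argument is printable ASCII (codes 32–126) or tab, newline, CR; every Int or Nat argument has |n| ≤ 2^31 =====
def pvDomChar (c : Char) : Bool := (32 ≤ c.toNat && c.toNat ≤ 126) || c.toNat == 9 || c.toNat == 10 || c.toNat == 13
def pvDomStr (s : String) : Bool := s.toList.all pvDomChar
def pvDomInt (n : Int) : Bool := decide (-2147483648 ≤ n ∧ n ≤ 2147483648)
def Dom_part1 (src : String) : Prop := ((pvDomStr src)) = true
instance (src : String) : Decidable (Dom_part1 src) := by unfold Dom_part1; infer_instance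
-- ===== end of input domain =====

-- B flattens the token stream and keeps one immutable (sum, product) pair per column,
-- rebuilt by slicing, instead of per-column number lists rescanned on each operator.

-- ===== PORT A =====
-- per-token step of A: state = (s, cols)
def pA_tok (st : Int × List (List Int)) (p : Int × String) : Int × List (List Int) :=
  if p.2 = "+" then (st.1 + (PySem.List.pyGetD st.2 p.1 []).sum, st.2)
  else if p.2 = "*" then (st.1 + (PySem.List.pyGetD st.2 p.1 []).foldl (· * ·) 1, st.2)
  else
    let n := (PySem.Int.ofStr? p.2).getD 0
    if (st.2.length : Int) ≤ p.1 then (st.1, st.2 ++ [[n]])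
    else (st.1, PySem.List.pySetD st.2 p.1 (PySem.List.pyGetD st.2 p.1 [] ++ [n]))

def pA_line (st : Int × List (List Int)) (line : String) : Int × List (List Int) :=
  (PySem.List.enumerate (PySem.Str.split₀ line) 0).foldl pA_tok st

def part1 (src : String) : Int :=
  ((PySem.Str.splitlines src).foldl pA_line (0, [])).1

-- ===== PORT B =====
def part1_alt (src : String) : Int :=
  (((PySem.Str.splitlines src).flatMap
      (fun line => PySem.List.enumerate (PySem.Str.split₀ line) 0)).foldl
    (fun st p =>
      if p.2 = "+" then (st.1 + (PySem.List.pyGetD st.2 p.1 (0, 1)).1, st.2)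
      else if p.2 = "*" then (st.1 + (PySem.List.pyGetD st.2 p.1 (0, 1)).2, st.2)
      else
        let n := (PySem.Int.ofStr? p.2).getD 0
        if (st.2.length : Int) ≤ p.1 then (st.1, st.2 ++ [(n, n)])
        else
          let q := PySem.List.pyGetD st.2 p.1 (0, 1)
          (st.1, PySem.List.slice st.2 none (some p.1)
                   ++ [(q.1 + n, q.2 * n)]
                   ++ PySem.List.slice st.2 (some (p.1 + 1)) none))
    (0, ([] : List (Int × Int)))).1

-- ===== PRECONDITION & SPEC =====
-- Pre_part1 excludes exactly the inputs on which Python A raises: a non-operator token that is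
-- not a valid int literal (ValueError), or an operator token whose column index is beyond the
-- number of columns created so far (IndexError). It tracks only the column COUNT, not any value.
def pvChkToks : List (Int × String) → Int → Option Int
  | [], k => some k
  | p :: rest, k =>
    if p.2 = "+" ∨ p.2 = "*" then
      if p.1 < k then pvChkToks rest k else none
    else match PySem.Int.ofStr? p.2 with
      | some _ => pvChkToks rest (if k ≤ p.1 then k + 1 else k)
      | none => none

def pvChkLines : List String → Int → Option Int
  | [], k => some k
  | line :: rest, k =>
    match pvChkToks (PySem.List.enumerate (PySem.Str.split₀ line) 0) k with
    | some k' => pvChkLines rest k'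
    | none => none

def Pre_part1 (src : String) : Prop :=
  (pvChkLines (PySem.Str.splitlines src) 0).isSome = true
instance (src : String) : Decidable (Pre_part1 src) := by unfold Pre_part1; infer_instance

def pvWitness_part1 : String := "1 2\n3 4\n+ *"

def Spec_part1 (src : String) (out : Int) : Prop := out = part1_alt src
instance (src : String) (out : Int) : Decidable (Spec_part1 src out) := by unfold Spec_part1; infer_instance

-- ===== CLAIM (what is proved, stated in full; the proofs are below) =====
def Claim_equal_part1 : Prop := ∀ (src : String), Dom_part1 src → Pre_part1 src → Spec_part1 src (part1 src)

-- ===== LEMMAS AND PROOFS =====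

-- B's token step, named for the proofs (definitionally the lambda inside part1_alt)
def pvBstep (st : Int × List (Int × Int)) (p : Int × String) : Int × List (Int × Int) :=
  if p.2 = "+" then (st.1 + (PySem.List.pyGetD st.2 p.1 (0, 1)).1, st.2)
  else if p.2 = "*" then (st.1 + (PySem.List.pyGetD st.2 p.1 (0, 1)).2, st.2)
  else
    let n := (PySem.Int.ofStr? p.2).getD 0
    if (st.2.length : Int) ≤ p.1 then (st.1, st.2 ++ [(n, n)])
    else
      let q := PySem.List.pyGetD st.2 p.1 (0, 1)
      (st.1, PySem.List.slice st.2 none (some p.1)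
               ++ [(q.1 + n, q.2 * n)]
               ++ PySem.List.slice st.2 (some (p.1 + 1)) none)

-- a column's aggregate: running sum and running product
def pvAgg (l : List Int) : Int × Int := (l.sum, l.foldl (· * ·) 1)

lemma pvAgg_append (l : List Int) (n : Int) :
    pvAgg (l ++ [n]) = ((pvAgg l).1 + n, (pvAgg l).2 * n) := by
  simp [pvAgg, List.foldl_append]

-- flattening: A's nested per-line fold is the fold over the flattened token stream
lemma pv_flatten (lines : List String) (st : Int × List (List Int)) :
    lines.foldl pA_line st =
      (lines.flatMap (fun line => PySem.List.enumerate (PySem.Str.split₀ line) 0)).foldl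
        pA_tok st := by
  induction lines generalizing st with
  | nil => rfl
  | cons l rest ih => simp [List.foldl_append, pA_line, ih]

-- one token preserves the aggregate relation
lemma pv_tok (p : Int × String) (hp : 0 ≤ p.1) (s : Int) (cols : List (List Int)) :
    pvBstep (s, cols.map pvAgg) p =
      ((pA_tok (s, cols) p).1, (pA_tok (s, cols) p).2.map pvAgg) := by
  obtain ⟨i, c⟩ := p
  have hg := PySem.List.pyGetD_map pvAgg cols i ([] : List Int)
  have h0 : pvAgg ([] : List Int) = (0, 1) := rfl
  rw [h0] at hg
  simp only [pA_tok, pvBstep, List.length_map]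
  by_cases h1 : c = "+"
  · simp [h1, hg, pvAgg]
  · by_cases h2 : c = "*"
    · simp [h2, hg, pvAgg]
    · obtain ⟨m, rfl⟩ := Int.eq_ofNat_of_zero_le hp
      by_cases h3 : (cols.length : Int) ≤ (m : Int)
      · simp [h1, h2, h3, pvAgg]
      · have hm : m < cols.length := by omega
        have hcast : ((m : Int) + 1) = ((m + 1 : Nat) : Int) := by push_cast; ring
        simp only [h1, h2, if_neg h3, hg, hcast,
          PySem.List.slice_to_natCast, PySem.List.slice_from_natCast,
          PySem.List.pySetD_natCast, PySem.List.pyGetD_natCast,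
          List.getD_eq_getElem _ _ hm]
        rw [List.set_eq_take_append_cons_drop]
        simp [hm, pvAgg_append]

-- a fold over tokens with nonnegative indices preserves the relation
lemma pv_toks (ps : List (Int × String)) (hp : ∀ p ∈ ps, 0 ≤ p.1) (s : Int)
    (cols : List (List Int)) :
    ps.foldl pvBstep (s, cols.map pvAgg) =
      ((ps.foldl pA_tok (s, cols)).1, (ps.foldl pA_tok (s, cols)).2.map pvAgg) := by
  induction ps generalizing s cols with
  | nil => simp
  | cons p rest ih =>
    simp only [List.foldl_cons]
    rw [pv_tok p (hp p (by simp)) s cols, ih (fun q hq => hp q (by simp [hq]))]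

lemma pv_flat_nonneg {lines : List String} {p : Int × String}
    (h : p ∈ lines.flatMap (fun line => PySem.List.enumerate (PySem.Str.split₀ line) 0)) :
    0 ≤ p.1 := by
  rw [List.mem_flatMap] at h
  obtain ⟨line, _, hmem⟩ := h
  rw [PySem.List.mem_enumerate_iff] at hmem
  obtain ⟨k, hk, rfl⟩ := hmem
  simp

lemma pv_main (src : String) : part1 src = part1_alt src := by
  have hB : part1_alt src =
      (((PySem.Str.splitlines src).flatMap
          (fun line => PySem.List.enumerate (PySem.Str.split₀ line) 0)).foldl
        pvBstep (0, [])).1 := rfl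
  unfold part1
  rw [hB, pv_flatten]
  have := pv_toks
    ((PySem.Str.splitlines src).flatMap
      (fun line => PySem.List.enumerate (PySem.Str.split₀ line) 0))
    (fun p hp => pv_flat_nonneg hp) 0 []
  simp only [List.map_nil] at this
  rw [this]

-- ===== VERDICT (by name: the statement is the Claim_ definition above) =====
theorem part1_spec : Claim_equal_part1 := by
  intro src _ _
  unfold Spec_part1
  exact pv_main src
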